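-- pv_equiv track=rewrite | github.com/qmeeus/transformers | examples/pytorch/token-classification/ner_metrics.py | get_ner_stats
-- ===== SOURCE A (Python) =====
-- from collections import defaultdict
-- from typing import Any, Dict, List, Tuple
--
-- NamedEntity = Tuple[str, str, int]
--
-- Json = Dict[str, Any]
--
-- def get_ner_stats(all_gt:List[NamedEntity], all_predictions:List[NamedEntity]) -> Json:
--     stats = {}
--     cnt = 0
--     for gt, pred in zip(all_gt, all_predictions):
--         entities_true = defaultdict(set)
--         entities_pred = defaultdict(set)
--         for type_name, entity_info1, entity_info2 in gt:
--             entities_true[type_name].add((entity_info1, entity_info2))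
--         for type_name, entity_info1, entity_info2 in pred:
--             entities_pred[type_name].add((entity_info1, entity_info2))
--         target_names = sorted(set(entities_true.keys()) | set(entities_pred.keys()))
--         for tag_name in target_names:
--             _ = stats.setdefault(tag_name, {})
--             _ = stats[tag_name].setdefault("tp", [])
--             _ = stats[tag_name].setdefault("gt_cnt", [])
--             _ = stats[tag_name].setdefault("pred_cnt", [])
--             entities_true_type = entities_true.get(tag_name, set())
--             entities_pred_type = entities_pred.get(tag_name, set())
--             stats[tag_name]["tp"].append(len(entities_true_type & entities_pred_type))
--             stats[tag_name]["pred_cnt"].append(len(entities_pred_type))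
--             stats[tag_name]["gt_cnt"].append(len(entities_true_type))
--     return stats
-- ===== SOURCE B (Python) =====
-- from collections import Counter
--
-- def get_ner_stats(all_gt, all_predictions):
--     stats = {}
--     for gt, pred in zip(all_gt, all_predictions):
--         gt_set = set(gt)
--         pred_set = set(pred)
--         tp_types = Counter(t for t, _, _ in gt_set & pred_set)
--         pred_types = Counter(t for t, _, _ in pred_set)
--         gt_types = Counter(t for t, _, _ in gt_set)
--         for tag in sorted(gt_types.keys() | pred_types.keys()):
--             entry = stats.setdefault(tag, {"tp": [], "gt_cnt": [], "pred_cnt": []})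
--             entry["tp"].append(tp_types.get(tag, 0))
--             entry["pred_cnt"].append(pred_types.get(tag, 0))
--             entry["gt_cnt"].append(gt_types.get(tag, 0))
--     return stats
-- ===== Notes on version B (the rewrite author's own statement) =====
-- stated objective: alternative
-- what changed: Replaces A's per-sample defaultdict(set) keyed by entity type with flat dedup sets of whole (type, info1, info2) triples, a single set intersection, and three Counters bucketing by type; the per-tag numbers are then plain Counter lookups with default 0.
import Mathlib
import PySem

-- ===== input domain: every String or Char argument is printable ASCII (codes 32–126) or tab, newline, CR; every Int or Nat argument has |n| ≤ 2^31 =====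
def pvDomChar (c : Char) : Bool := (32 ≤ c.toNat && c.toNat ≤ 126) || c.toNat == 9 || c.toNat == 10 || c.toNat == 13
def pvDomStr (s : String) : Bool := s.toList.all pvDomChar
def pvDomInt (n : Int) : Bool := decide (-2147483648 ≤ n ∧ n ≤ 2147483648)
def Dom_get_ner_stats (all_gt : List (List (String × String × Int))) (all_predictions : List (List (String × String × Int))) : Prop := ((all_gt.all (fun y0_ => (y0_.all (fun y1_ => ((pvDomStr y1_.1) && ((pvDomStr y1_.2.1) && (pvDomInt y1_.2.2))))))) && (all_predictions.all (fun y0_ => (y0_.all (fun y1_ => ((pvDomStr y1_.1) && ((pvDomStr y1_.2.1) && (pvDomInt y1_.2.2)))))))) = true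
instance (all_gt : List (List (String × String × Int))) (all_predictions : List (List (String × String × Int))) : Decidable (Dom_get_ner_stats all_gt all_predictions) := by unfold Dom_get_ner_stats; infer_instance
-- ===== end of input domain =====

-- B replaces A's per-sample defaultdict-of-sets by flat dedup sets of whole
-- (type, info1, info2) triples, one set intersection, and three Counters keyed
-- by type; objective: alternative (same asymptotic cost, different decomposition).


-- ===== PORT A =====
-- defaultdict(set) built by the two inner 'for' loops of A
def pvEnt (l : List (String × String × Int)) : PySem.Dict String (PySem.Set (String × Int)) :=
  l.foldl (fun d e => d.modify e.1 PySem.Set.empty (fun s => PySem.Set.add s e.2)) PySem.Dict.empty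

-- A's per-tag update of `stats`: the setdefault chain then the three appends
def pvUpdA (stats : PySem.Dict String (PySem.Dict String (List Int))) (tag : String)
    (tp pc gc : Int) : PySem.Dict String (PySem.Dict String (List Int)) :=
  let stats := stats.setdefault tag PySem.Dict.empty
  let inner := stats.getD tag PySem.Dict.empty
  let inner := inner.setdefault "tp" ([] : List Int)
  let inner := inner.setdefault "gt_cnt" []
  let inner := inner.setdefault "pred_cnt" []
  let inner := inner.insert "tp" (inner.getD "tp" [] ++ [tp])
  let inner := inner.insert "pred_cnt" (inner.getD "pred_cnt" [] ++ [pc])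
  let inner := inner.insert "gt_cnt" (inner.getD "gt_cnt" [] ++ [gc])
  stats.insert tag inner

-- A's body of the outer 'for gt, pred in zip(...)' loop
def pvStepA (stats : PySem.Dict String (PySem.Dict String (List Int)))
    (gp : List (String × String × Int) × List (String × String × Int)) :
    PySem.Dict String (PySem.Dict String (List Int)) :=
  let entities_true := pvEnt gp.1
  let entities_pred := pvEnt gp.2
  let target_names := PySem.List.sorted
      (PySem.Set.union (PySem.Set.ofList entities_true.keys) (PySem.Set.ofList entities_pred.keys))
      (fun x => x)
  target_names.foldl (fun stats tag =>
    let entities_true_type := entities_true.getD tag PySem.Set.empty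
    let entities_pred_type := entities_pred.getD tag PySem.Set.empty
    pvUpdA stats tag
      (PySem.Set.len (PySem.Set.inter entities_true_type entities_pred_type))
      (PySem.Set.len entities_pred_type)
      (PySem.Set.len entities_true_type)) stats

def get_ner_stats (all_gt : List (List (String × String × Int))) (all_predictions : List (List (String × String × Int))) : List (String × List (String × List Int)) :=
  (((all_gt.zip all_predictions).foldl pvStepA PySem.Dict.empty).items).map (fun p => (p.1, p.2.items))

-- ===== PORT B =====
-- B's per-tag update: entry = stats.setdefault(tag, {...}); three appends
def pvUpdB (stats : PySem.Dict String (PySem.Dict String (List Int))) (tag : String)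
    (tp pc gc : Int) : PySem.Dict String (PySem.Dict String (List Int)) :=
  let stats := stats.setdefault tag
      (PySem.Dict.ofList [("tp", ([] : List Int)), ("gt_cnt", []), ("pred_cnt", [])])
  let entry := stats.getD tag PySem.Dict.empty
  let entry := entry.insert "tp" (entry.getD "tp" [] ++ [tp])
  let entry := entry.insert "pred_cnt" (entry.getD "pred_cnt" [] ++ [pc])
  let entry := entry.insert "gt_cnt" (entry.getD "gt_cnt" [] ++ [gc])
  stats.insert tag entry

-- B's body of the outer loop: dedup-triple sets, one intersection, three Counters
def pvStepB (stats : PySem.Dict String (PySem.Dict String (List Int)))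
    (gp : List (String × String × Int) × List (String × String × Int)) :
    PySem.Dict String (PySem.Dict String (List Int)) :=
  let gt_set := PySem.Set.ofList gp.1
  let pred_set := PySem.Set.ofList gp.2
  let tp_types := PySem.Dict.counter ((PySem.Set.inter gt_set pred_set).map (fun e => e.1))
  let pred_types := PySem.Dict.counter (pred_set.map (fun e => e.1))
  let gt_types := PySem.Dict.counter (gt_set.map (fun e => e.1))
  let tags := PySem.List.sorted
      (PySem.Set.union (PySem.Set.ofList gt_types.keys) pred_types.keys) (fun x => x)
  tags.foldl (fun stats tag =>
    pvUpdB stats tag (tp_types.getD tag 0) (pred_types.getD tag 0) (gt_types.getD tag 0)) stats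

def get_ner_stats_alt (all_gt : List (List (String × String × Int))) (all_predictions : List (List (String × String × Int))) : List (String × List (String × List Int)) :=
  (((all_gt.zip all_predictions).foldl pvStepB PySem.Dict.empty).items).map (fun p => (p.1, p.2.items))

-- ===== PRECONDITION & SPEC =====
def Spec_get_ner_stats (all_gt : List (List (String × String × Int))) (all_predictions : List (List (String × String × Int))) (out : List (String × List (String × List Int))) : Prop := out = get_ner_stats_alt all_gt all_predictions
instance (all_gt : List (List (String × String × Int))) (all_predictions : List (List (String × String × Int))) (out : List (String × List (String × List Int))) : Decidable (Spec_get_ner_stats all_gt all_predictions out) := by unfold Spec_get_ner_stats; infer_instance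

-- ===== CLAIM (what is proved, stated in full; the proofs are below) =====
def Claim_equal_get_ner_stats : Prop := ∀ (all_gt : List (List (String × String × Int))) (all_predictions : List (List (String × String × Int))), Dom_get_ner_stats all_gt all_predictions → Spec_get_ner_stats all_gt all_predictions (get_ner_stats all_gt all_predictions)

-- ===== LEMMAS AND PROOFS =====

-- invariant: every inner dict already stored in stats carries the three keys
def pvInv (stats : PySem.Dict String (PySem.Dict String (List Int))) : Prop :=
  ∀ k v, stats.get? k = some v →
    v.contains "tp" = true ∧ v.contains "gt_cnt" = true ∧ v.contains "pred_cnt" = true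

lemma pvUpd_eq (stats : PySem.Dict String (PySem.Dict String (List Int))) (tag : String)
    (tp pc gc : Int) (h : pvInv stats) : pvUpdA stats tag tp pc gc = pvUpdB stats tag tp pc gc := by
  by_cases hc : stats.contains tag = true
  · obtain ⟨v, hv⟩ : ∃ v, stats.get? tag = some v := by
      rw [PySem.Dict.contains_eq_isSome_get?] at hc
      exact Option.isSome_iff_exists.mp hc
    obtain ⟨h1, h2, h3⟩ := h tag v hv
    unfold pvUpdA pvUpdB
    dsimp only
    rw [PySem.Dict.setdefault_of_contains _ _ hc, PySem.Dict.setdefault_of_contains _ _ hc,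
        PySem.Dict.getD_of_get?_eq_some _ _ hv,
        PySem.Dict.setdefault_of_contains _ _ h1, PySem.Dict.setdefault_of_contains _ _ h2,
        PySem.Dict.setdefault_of_contains _ _ h3]
  · have hc' : stats.contains tag = false := by simpa using hc
    unfold pvUpdA pvUpdB
    dsimp only
    rw [PySem.Dict.setdefault_of_not_contains _ _ hc', PySem.Dict.setdefault_of_not_contains _ _ hc',
        PySem.Dict.getD_insert_self, PySem.Dict.getD_insert_self,
        PySem.Dict.insert_insert_self, PySem.Dict.insert_insert_self]
    rfl

lemma pvInv_updB (stats : PySem.Dict String (PySem.Dict String (List Int))) (tag : String)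
    (tp pc gc : Int) (h : pvInv stats) : pvInv (pvUpdB stats tag tp pc gc) := by
  intro k v hv
  unfold pvUpdB at hv
  dsimp only at hv
  by_cases hk : k = tag
  · subst hk
    rw [PySem.Dict.get?_insert_self] at hv
    cases hv
    refine ⟨?_, ?_, ?_⟩ <;> simp [PySem.Dict.contains_insert]
  · rw [PySem.Dict.get?_insert_of_ne _ _ hk, PySem.Dict.get?_setdefault_of_ne _ _ hk] at hv
    exact h k v hv

lemma pvEnt_keys (l : List (String × String × Int)) :
    (pvEnt l).keys = PySem.Set.ofList (l.map (fun e => e.1)) := by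
  unfold pvEnt
  rw [PySem.Dict.keys_foldl_modify_key l (fun e => e.1) PySem.Set.empty
        (fun _ e s => PySem.Set.add s e.2) PySem.Dict.empty,
      PySem.Dict.keys_empty, PySem.Set.update_nil_left]

lemma pvEnt_getD (l : List (String × String × Int)) (t : String) :
    (pvEnt l).getD t PySem.Set.empty
      = PySem.Set.ofList ((l.filter (fun e => e.1 == t)).map (fun e => e.2)) := by
  have aux : ∀ (l : List (String × String × Int)) (d : PySem.Dict String (PySem.Set (String × Int))),
      (l.foldl (fun d e => d.modify e.1 PySem.Set.empty (fun s => PySem.Set.add s e.2)) d).getD t PySem.Set.empty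
        = PySem.Set.update (d.getD t PySem.Set.empty) ((l.filter (fun e => e.1 == t)).map (fun e => e.2)) := by
    intro l
    induction l with
    | nil => intro d; simp [PySem.Set.update_nil]
    | cons e l ih =>
        intro d
        by_cases he : e.1 = t
        · simp only [List.foldl_cons, List.filter_cons, he, beq_self_eq_true, if_pos, List.map_cons]
          rw [ih, PySem.Set.update_cons]
          congr 1
          have : t = e.1 := he.symm
          subst this
          rw [PySem.Dict.getD_modify_self]
        · have hne : ¬ (e.1 == t) = true := by simpa using he
          simp only [List.foldl_cons, List.filter_cons, if_neg hne]
          rw [ih]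
          congr 1
          rw [PySem.Dict.getD_modify_of_ne _ _ _ (fun hh => he hh.symm)]
  unfold pvEnt
  rw [aux l PySem.Dict.empty, PySem.Dict.getD_empty]
  exact PySem.Set.update_nil_left _

-- a Nodup list of pairs whose members are exactly the t-typed members of a Nodup
-- triple list s has length = number of t-typed entries of s
lemma pvCountPairs (t : String) (s : List (String × String × Int)) (hs : s.Nodup)
    (w : List (String × Int)) (hw : w.Nodup) (hmem : ∀ x, x ∈ w ↔ (t, x) ∈ s) :
    w.length = List.count t (s.map (fun e => e.1)) := by
  have hcount : List.count t (s.map (fun e => e.1)) = List.countP (fun e => e.1 == t) s := by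
    rw [List.count_eq_countP, List.countP_map]; rfl
  rw [hcount, List.countP_eq_length_filter]
  have hFnd : (s.filter (fun e => e.1 == t)).Nodup := hs.filter _
  have hFt : ∀ e ∈ s.filter (fun e => e.1 == t), e.1 = t := by
    intro e he
    have := List.of_mem_filter he
    simpa using this
  have hmnd : ((s.filter (fun e => e.1 == t)).map (fun e => e.2)).Nodup := by
    refine hFnd.map_on ?_
    intro x hx y hy hxy
    obtain ⟨x1, x2⟩ := x
    obtain ⟨y1, y2⟩ := y
    have h1 : x1 = t := hFt _ hx
    have h2 : y1 = t := hFt _ hy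
    simp_all
  have hmm : ∀ x, x ∈ (s.filter (fun e => e.1 == t)).map (fun e => e.2) ↔ (t, x) ∈ s := by
    intro x
    simp only [List.mem_map, List.mem_filter, beq_iff_eq]
    constructor
    · rintro ⟨e, ⟨hel, het⟩, rfl⟩
      obtain ⟨e1, e2⟩ := e
      subst het
      exact hel
    · intro hts
      exact ⟨(t, x), ⟨hts, rfl⟩, rfl⟩
  have hperm : w.Perm ((s.filter (fun e => e.1 == t)).map (fun e => e.2)) :=
    (List.perm_ext_iff_of_nodup hw hmnd).mpr (fun a => (hmem a).trans (hmm a).symm)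
  simpa using hperm.length_eq

lemma pvMemPairs (l : List (String × String × Int)) (t : String) (x : String × Int) :
    x ∈ PySem.Set.ofList ((l.filter (fun e => e.1 == t)).map (fun e => e.2)) ↔ (t, x) ∈ l := by
  simp only [PySem.Set.mem_ofList, List.mem_map, List.mem_filter, beq_iff_eq]
  constructor
  · rintro ⟨e, ⟨hel, het⟩, rfl⟩
    obtain ⟨e1, e2⟩ := e
    subst het
    exact hel
  · intro hts
    exact ⟨(t, x), ⟨hts, rfl⟩, rfl⟩

lemma pvTags_eq (g p : List (String × String × Int)) :
    PySem.List.sorted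
      (PySem.Set.union (PySem.Set.ofList (pvEnt g).keys) (PySem.Set.ofList (pvEnt p).keys))
      (fun x => x)
    = PySem.List.sorted
      (PySem.Set.union
        (PySem.Set.ofList (PySem.Dict.counter ((PySem.Set.ofList g).map (fun e => e.1))).keys)
        (PySem.Dict.counter ((PySem.Set.ofList p).map (fun e => e.1))).keys)
      (fun x => x) := by
  have hUAnd : (PySem.Set.union (PySem.Set.ofList (pvEnt g).keys) (PySem.Set.ofList (pvEnt p).keys)).Nodup :=
    PySem.Set.nodup_union _ _ (PySem.Set.nodup_ofList _)
  have hUBnd : (PySem.Set.union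
      (PySem.Set.ofList (PySem.Dict.counter ((PySem.Set.ofList g).map (fun e => e.1))).keys)
      (PySem.Dict.counter ((PySem.Set.ofList p).map (fun e => e.1))).keys).Nodup :=
    PySem.Set.nodup_union _ _ (PySem.Set.nodup_ofList _)
  have hmem : ∀ a, a ∈ PySem.Set.union
      (PySem.Set.ofList (PySem.Dict.counter ((PySem.Set.ofList g).map (fun e => e.1))).keys)
      (PySem.Dict.counter ((PySem.Set.ofList p).map (fun e => e.1))).keys
      ↔ a ∈ PySem.Set.union (PySem.Set.ofList (pvEnt g).keys) (PySem.Set.ofList (pvEnt p).keys) := by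
    intro a
    simp [PySem.Set.mem_union, PySem.Set.mem_ofList, pvEnt_keys, PySem.Dict.keys_counter,
      List.mem_map]
  refine PySem.List.sorted_eq_of_perm_of_pairwise_lt _ _ (fun x => x) ?_ ?_
  · exact (PySem.List.sorted_perm _ _ false).trans
      ((List.perm_ext_iff_of_nodup hUBnd hUAnd).mpr hmem)
  · have hle := PySem.List.sorted_pairwise (PySem.Set.union
      (PySem.Set.ofList (PySem.Dict.counter ((PySem.Set.ofList g).map (fun e => e.1))).keys)
      (PySem.Dict.counter ((PySem.Set.ofList p).map (fun e => e.1))).keys) (fun x => x)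
    have hnd := (PySem.List.sorted_perm (PySem.Set.union
      (PySem.Set.ofList (PySem.Dict.counter ((PySem.Set.ofList g).map (fun e => e.1))).keys)
      (PySem.Dict.counter ((PySem.Set.ofList p).map (fun e => e.1))).keys) (fun x => x) false).nodup_iff.mpr hUBnd
    exact (hle.and hnd).imp (fun h => lt_of_le_of_ne h.1 h.2)

lemma pvCounts_eq (g p : List (String × String × Int)) (t : String) :
    PySem.Set.len (PySem.Set.inter (pvEnt g |>.getD t PySem.Set.empty) (pvEnt p |>.getD t PySem.Set.empty))
      = (PySem.Dict.counter ((PySem.Set.inter (PySem.Set.ofList g) (PySem.Set.ofList p)).map (fun e => e.1))).getD t 0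
    ∧ PySem.Set.len (pvEnt p |>.getD t PySem.Set.empty)
      = (PySem.Dict.counter ((PySem.Set.ofList p).map (fun e => e.1))).getD t 0
    ∧ PySem.Set.len (pvEnt g |>.getD t PySem.Set.empty)
      = (PySem.Dict.counter ((PySem.Set.ofList g).map (fun e => e.1))).getD t 0 := by
  refine ⟨?_, ?_, ?_⟩
  · rw [pvEnt_getD, pvEnt_getD, PySem.Dict.getD_counter]
    unfold PySem.Set.len
    congr 1
    refine pvCountPairs t _ (PySem.Set.nodup_inter _ _ (PySem.Set.nodup_ofList _)) _
      (PySem.Set.nodup_inter _ _ (PySem.Set.nodup_ofList _)) ?_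
    intro x
    rw [PySem.Set.mem_inter, PySem.Set.mem_inter, pvMemPairs, pvMemPairs,
      PySem.Set.mem_ofList, PySem.Set.mem_ofList]
  · rw [pvEnt_getD, PySem.Dict.getD_counter]
    unfold PySem.Set.len
    congr 1
    exact pvCountPairs t _ (PySem.Set.nodup_ofList _) _ (PySem.Set.nodup_ofList _)
      (fun x => (pvMemPairs p t x).trans (PySem.Set.mem_ofList p (t, x)).symm)
  · rw [pvEnt_getD, PySem.Dict.getD_counter]
    unfold PySem.Set.len
    congr 1
    exact pvCountPairs t _ (PySem.Set.nodup_ofList _) _ (PySem.Set.nodup_ofList _)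
      (fun x => (pvMemPairs g t x).trans (PySem.Set.mem_ofList g (t, x)).symm)

lemma pvFold_eq (f1 f2 f3 g1 g2 g3 : String → Int)
    (hf : ∀ t, f1 t = g1 t ∧ f2 t = g2 t ∧ f3 t = g3 t) :
    ∀ (tags : List String) (stats : PySem.Dict String (PySem.Dict String (List Int))),
      pvInv stats →
      tags.foldl (fun s t => pvUpdA s t (f1 t) (f2 t) (f3 t)) stats
        = tags.foldl (fun s t => pvUpdB s t (g1 t) (g2 t) (g3 t)) stats := by
  intro tags
  induction tags with
  | nil => intro stats _; rfl
  | cons t ts ih =>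
      intro stats hInv
      simp only [List.foldl_cons]
      rw [pvUpd_eq _ _ _ _ _ hInv, (hf t).1, (hf t).2.1, (hf t).2.2]
      exact ih _ (pvInv_updB _ _ _ _ _ hInv)

lemma pvFoldB_inv (tags : List String) (g1 g2 g3 : String → Int) :
    ∀ (stats : PySem.Dict String (PySem.Dict String (List Int))), pvInv stats →
      pvInv (tags.foldl (fun s t => pvUpdB s t (g1 t) (g2 t) (g3 t)) stats) := by
  induction tags with
  | nil => intro stats h; exact h
  | cons t ts ih => intro stats h; exact ih _ (pvInv_updB _ _ _ _ _ h)

lemma pvStep_eq (stats : PySem.Dict String (PySem.Dict String (List Int)))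
    (gp : List (String × String × Int) × List (String × String × Int)) (h : pvInv stats) :
    pvStepA stats gp = pvStepB stats gp := by
  unfold pvStepA pvStepB
  dsimp only
  rw [pvTags_eq gp.1 gp.2]
  exact pvFold_eq _ _ _ _ _ _ (fun t => pvCounts_eq gp.1 gp.2 t) _ stats h

lemma pvStepB_inv (stats : PySem.Dict String (PySem.Dict String (List Int)))
    (gp : List (String × String × Int) × List (String × String × Int)) (h : pvInv stats) :
    pvInv (pvStepB stats gp) := by
  unfold pvStepB
  dsimp only
  exact pvFoldB_inv _ _ _ _ stats h

lemma pvOuter_eq (L : List (List (String × String × Int) × List (String × String × Int))) :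
    ∀ stats, pvInv stats → L.foldl pvStepA stats = L.foldl pvStepB stats := by
  induction L with
  | nil => intro stats _; rfl
  | cons gp L ih =>
      intro stats h
      simp only [List.foldl_cons]
      rw [pvStep_eq stats gp h]
      exact ih _ (pvStepB_inv stats gp h)

-- ===== VERDICT (by name: the statement is the Claim_ definition above) =====
theorem get_ner_stats_spec : Claim_equal_get_ner_stats := by
  intro all_gt all_predictions _
  unfold Spec_get_ner_stats get_ner_stats get_ner_stats_alt
  rw [pvOuter_eq _ PySem.Dict.empty (fun k v h => by simp [PySem.Dict.get?_empty] at h)]
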